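-- pv_equiv track=rewrite | github.com/BlackSatan/simulation-modeling-queue-theory | one_channel_limit.py | queue_plot
-- ===== SOURCE A (Python) =====
-- def find_exec_time(arrival_time, exec_arr):
--     last_exec = exec_arr[-1]
--     return max(arrival_time, last_exec[1])
--
-- def system_run(incoming_dist, executing_dist, m):
--     result = []
--     time = 0
--     for index, inc in enumerate(incoming_dist):
--         exc = executing_dist[index]
--         if index == 0:
--             time += inc + exc
--             result.append([inc, inc + exc])
--         else:
--             arrival_time = sum(incoming_dist[:index])
--             start = find_exec_time(arrival_time, result)
--             queued_items_count = sum(list(map(lambda st: 1 if st[0] > arrival_time else 0, result)))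
--             if queued_items_count > m:
--                 continue
--             result.append([start, start + exc])
--     return result
--
-- def queue_plot(incoming_dist, executing_dist, m):
--     result = system_run(incoming_dist, executing_dist, m)
--     x = []
--     y = []
--     arrival_times = [
--         sum(incoming_dist[:index])
--         for index, i in enumerate(incoming_dist)
--     ]
--     for index, coord in enumerate(result):
--         arrival_time = arrival_times[index]
--         if arrival_time < coord[0]:
--             y.append(len(list(filter(lambda arr_time: arr_time < coord[0], arrival_times[index:]))))
--             x.append(coord[0])
--         else:
--             y.append(0)
--             x.append(coord[0])
--     return x, y
-- ===== SOURCE B (Python) =====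
-- def _bisect_left(a, x):
--     lo, hi = 0, len(a)
--     while lo < hi:
--         mid = (lo + hi) // 2
--         if a[mid] < x:
--             lo = mid + 1
--         else:
--             hi = mid
--     return lo
--
-- def _bisect_right(a, x):
--     lo, hi = 0, len(a)
--     while lo < hi:
--         mid = (lo + hi) // 2
--         if x < a[mid]:
--             hi = mid
--         else:
--             lo = mid + 1
--     return lo
--
-- def _insort(a, x):
--     a.insert(_bisect_right(a, x), x)
--
-- def queue_plot(incoming_dist, executing_dist, m):
--     n = len(incoming_dist)
--     # arrival times = prefix sums, computed once (A recomputes each by slicing)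
--     arrivals = []
--     s = 0
--     for v in incoming_dist:
--         arrivals.append(s)
--         s += v
--     # simulation: keep a sorted list of accepted start times and the last end time
--     result = []
--     starts = []
--     end = 0
--     for i in range(n):
--         exc = executing_dist[i]
--         if i == 0:
--             first = incoming_dist[0]
--             end = first + exc
--             result.append((first, end))
--             _insort(starts, first)
--         else:
--             at = arrivals[i]
--             if len(starts) - _bisect_right(starts, at) <= m:
--                 start = at if at > end else end
--                 end = start + exc
--                 result.append((start, end))
--                 _insort(starts, start)
--     k = len(result)
--     x = [c[0] for c in result]
--     y = [0] * k
--     # plot counts: walk indices backwards keeping arrivals[idx:] as a sorted list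
--     suffix = []
--     for idx in range(n - 1, -1, -1):
--         _insort(suffix, arrivals[idx])
--         if idx < k:
--             start = result[idx][0]
--             if arrivals[idx] < start:
--                 y[idx] = _bisect_left(suffix, start)
--     return x, y
-- ===== Notes on version B (the rewrite author's own statement) =====
-- stated objective: faster
-- what changed: B computes arrival times once as running prefix sums and replaces A's per-step rescans (sum of a slice, a full scan of accepted items for the queued count, and a suffix filter per plotted point) by binary search (hand-written bisect/insort) over sorted lists of accepted start times and of the remaining arrival times, walking the plot indices backwards.
import Mathlib
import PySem

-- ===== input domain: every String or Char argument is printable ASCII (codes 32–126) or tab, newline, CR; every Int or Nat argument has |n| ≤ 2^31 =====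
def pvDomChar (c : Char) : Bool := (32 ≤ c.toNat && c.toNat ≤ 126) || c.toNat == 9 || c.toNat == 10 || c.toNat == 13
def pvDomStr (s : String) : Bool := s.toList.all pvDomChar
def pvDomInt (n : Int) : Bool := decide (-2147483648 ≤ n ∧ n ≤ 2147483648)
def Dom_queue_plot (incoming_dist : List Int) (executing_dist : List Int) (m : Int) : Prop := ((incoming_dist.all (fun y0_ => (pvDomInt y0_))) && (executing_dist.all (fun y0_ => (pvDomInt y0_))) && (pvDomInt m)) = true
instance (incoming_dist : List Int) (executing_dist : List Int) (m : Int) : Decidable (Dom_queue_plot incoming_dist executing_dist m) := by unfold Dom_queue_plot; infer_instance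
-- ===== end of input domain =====

-- B replaces A's per-step rescans (slice sums, queued-count scan, suffix filters) by one prefix-sum
-- pass plus binary search / sorted insertion over sorted lists; measurably faster on large inputs.

-- ===== PORT A =====

def find_exec_time (arrival_time : Int) (exec_arr : List (Int × Int)) : Int :=
  -- exec_arr[-1]; exec_arr = result is nonempty at every call site
  let last_exec := (PySem.List.pyGet? exec_arr (-1)).getD (0, 0)
  max arrival_time last_exec.2

-- the body of system_run's for-loop, named so the proofs below can speak about one step
def systemRunStep (incoming_dist : List Int) (executing_dist : List Int) (m : Int)
    (st : List (Int × Int) × Int) (p : Int × Int) : List (Int × Int) × Int :=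
  let result := st.1
  let time := st.2
  let index := p.1
  let inc := p.2
  let exc := (PySem.List.pyGet? executing_dist index).getD 0   -- in range under Pre_
  if index = 0 then
    (result ++ [(inc, inc + exc)], time + (inc + exc))
  else
    let arrival_time := (PySem.List.slice incoming_dist none (some index)).sum
    let start := find_exec_time arrival_time result
    let queued := (result.map (fun stt => if stt.1 > arrival_time then (1 : Int) else 0)).sum
    if queued > m then (result, time)
    else (result ++ [(start, start + exc)], time)

def system_run (incoming_dist : List Int) (executing_dist : List Int) (m : Int) : List (Int × Int) :=
  ((PySem.List.enumerate incoming_dist).foldl (systemRunStep incoming_dist executing_dist m) ([], 0)).1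

-- the body of queue_plot's for-loop
def plotStepA (arrival_times : List Int) (xy : List Int × List Int) (p : Int × (Int × Int)) :
    List Int × List Int :=
  let index := p.1
  let coord := p.2
  let arrival_time := (PySem.List.pyGet? arrival_times index).getD 0  -- in range: result is never longer than incoming_dist
  if arrival_time < coord.1 then
    (xy.1 ++ [coord.1],
     xy.2 ++ [(((PySem.List.slice arrival_times (some index) none).filter
                 (fun arr_time => decide (arr_time < coord.1))).length : Int)])
  else
    (xy.1 ++ [coord.1], xy.2 ++ [(0 : Int)])

def queue_plot (incoming_dist : List Int) (executing_dist : List Int) (m : Int) :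
    List Int × List Int :=
  let result := system_run incoming_dist executing_dist m
  let arrival_times := (PySem.List.enumerate incoming_dist).map
      (fun p => (PySem.List.slice incoming_dist none (some p.1)).sum)
  let xy := (PySem.List.enumerate result).foldl (plotStepA arrival_times) ([], [])
  (xy.1, xy.2)

-- ===== PORT B =====

-- Source B's _bisect_left/_bisect_right are CPython's bisect_left/bisect_right binary searches,
-- ported as PySem.List.bisectLeft / bisectRight; _insort is a.insert(_bisect_right(a,x), x).
def pyInsort (xs : List Int) (v : Int) : List Int :=
  PySem.List.insert xs ((PySem.List.bisectRight xs v : Nat) : Int) v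

-- body of B's simulation loop; state = (result, sorted accepted start times, last end time)
def simStepB (incoming_dist : List Int) (executing_dist : List Int) (m : Int)
    (arrivals : List Int) (st : List (Int × Int) × List Int × Int) (i : Int) :
    List (Int × Int) × List Int × Int :=
  let result := st.1
  let starts := st.2.1
  let e := st.2.2
  let exc := PySem.List.pyGetD executing_dist i 0   -- in range under Pre_
  if i = 0 then
    let first := PySem.List.pyGetD incoming_dist 0 0
    (result ++ [(first, first + exc)], pyInsort starts first, first + exc)
  else
    let at_ := PySem.List.pyGetD arrivals i 0
    if (starts.length : Int) - (PySem.List.bisectRight starts at_ : Int) ≤ m then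
      let start := if at_ > e then at_ else e
      (result ++ [(start, start + exc)], pyInsort starts start, start + exc)
    else st

-- body of B's backward plot loop; state = (sorted remaining arrivals, y built back to front)
def plotStepB (arrivals : List Int) (result : List (Int × Int)) (k : Nat)
    (st : List Int × List Int) (idx : Int) : List Int × List Int :=
  let suffix := pyInsort st.1 (PySem.List.pyGetD arrivals idx 0)
  if idx < (k : Int) then
    let start := (PySem.List.pyGetD result idx (0, 0)).1
    let yv : Int := if PySem.List.pyGetD arrivals idx 0 < start
                    then (PySem.List.bisectLeft suffix start : Int) else 0
    (suffix, yv :: st.2)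
  else (suffix, st.2)

def queue_plot_alt (incoming_dist : List Int) (executing_dist : List Int) (m : Int) :
    List Int × List Int :=
  let n := incoming_dist.length
  let arrivals := (incoming_dist.foldl
      (fun (st : List Int × Int) v => (st.1 ++ [st.2], st.2 + v)) ([], 0)).1
  let sim := (PySem.List.pyRange 0 (n : Int) 1).foldl
      (simStepB incoming_dist executing_dist m arrivals) ([], [], 0)
  let result := sim.1
  let k := result.length
  let x := result.map (fun c => c.1)
  -- Source B writes y[idx] descending into a zero-filled array; prepending while idx descends
  -- builds the same list front to back
  let plotted := (PySem.List.pyRange ((n : Int) - 1) (-1) (-1)).foldl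
      (plotStepB arrivals result k) ([], [])
  (x, plotted.2)

-- ===== PRECONDITION & SPEC =====
-- Python A evaluates executing_dist[index] for every index of incoming_dist and raises IndexError
-- when executing_dist is shorter; exactly those inputs are excluded.
def Pre_queue_plot (incoming_dist : List Int) (executing_dist : List Int) (m : Int) : Prop :=
  incoming_dist.length ≤ executing_dist.length
instance (incoming_dist : List Int) (executing_dist : List Int) (m : Int) : Decidable (Pre_queue_plot incoming_dist executing_dist m) := by unfold Pre_queue_plot; infer_instance

def pvWitness_queue_plot : List Int × List Int × Int := ([3, 2, 4, 1], [2, 3, 1, 2], 1)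

def Spec_queue_plot (incoming_dist : List Int) (executing_dist : List Int) (m : Int) (out : List Int × List Int) : Prop := out = queue_plot_alt incoming_dist executing_dist m
instance (incoming_dist : List Int) (executing_dist : List Int) (m : Int) (out : List Int × List Int) : Decidable (Spec_queue_plot incoming_dist executing_dist m out) := by unfold Spec_queue_plot; infer_instance

-- ===== CLAIM (what is proved, stated in full; the proofs are below) =====
def Claim_equal_queue_plot : Prop := ∀ (incoming_dist : List Int) (executing_dist : List Int) (m : Int), Dom_queue_plot incoming_dist executing_dist m → Pre_queue_plot incoming_dist executing_dist m → Spec_queue_plot incoming_dist executing_dist m (queue_plot incoming_dist executing_dist m)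

-- ===== LEMMAS AND PROOFS =====

-- the canonical list of arrival times: prefix sums of incoming_dist
def preSums (l : List Int) : List Int := (List.range l.length).map (fun i => (l.take i).sum)

lemma length_preSums (l : List Int) : (preSums l).length = l.length := by
  simp [preSums]

lemma preSums_getElem (l : List Int) (i : Nat) (h : i < l.length) :
    (preSums l)[i]'(by simpa [preSums] using h) = (l.take i).sum := by
  simp [preSums]

-- (1) A's arrival_times list is preSums
lemma arrivalsA_eq (l : List Int) :
    (PySem.List.enumerate l).map (fun p => (PySem.List.slice l none (some p.1)).sum)
      = preSums l := by
  have h1 : (fun p : ℤ × ℤ => (PySem.List.slice l none (some p.1)).sum)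
      = (fun j => (PySem.List.slice l none (some j)).sum) ∘ Prod.fst := rfl
  rw [h1, ← List.map_map, PySem.List.map_fst_enumerate, PySem.List.pyRange_one, List.map_map]
  simp [preSums, PySem.List.slice_to_natCast]

-- (2) B's arrivals fold computes preSums
lemma arrivals_fold (l : List Int) (acc : List Int) (s : Int) :
    (l.foldl (fun (st : List Int × Int) v => (st.1 ++ [st.2], st.2 + v)) (acc, s)).1
      = acc ++ (List.range l.length).map (fun i => s + (l.take i).sum) := by
  induction l generalizing acc s with
  | nil => simp
  | cons v t ih =>
    simp only [List.foldl_cons, ih, List.length_cons, List.range_succ_eq_map, List.map_cons,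
      List.map_map]
    simp [List.sum_cons, Function.comp_def, add_assoc]

lemma arrivalsB_eq (l : List Int) :
    (l.foldl (fun (st : List Int × Int) v => (st.1 ++ [st.2], st.2 + v)) ([], 0)).1
      = preSums l := by
  rw [arrivals_fold]
  simp [preSums]

lemma preSums_pyGetD (l : List Int) (i : Nat) (h : i < l.length) :
    PySem.List.pyGetD (preSums l) (i : Int) 0 = (l.take i).sum := by
  rw [PySem.List.pyGetD_natCast, preSums, PySem.List.getD_map_range _ _ _ _ h]

-- (4) bisect = countP on a sorted list
lemma bisectRight_eq_countP (xs : List Int) (v : Int) (h : xs.Pairwise (· ≤ ·)) :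
    PySem.List.bisectRight xs v = xs.countP (fun a => a ≤ v) := by
  obtain ⟨hle, h1, h2⟩ := PySem.List.bisectRight_spec xs v h
  conv_rhs => rw [← List.take_append_drop (PySem.List.bisectRight xs v) xs]
  rw [List.countP_append]
  have ht : (xs.take (PySem.List.bisectRight xs v)).countP (fun a => a ≤ v)
      = (xs.take (PySem.List.bisectRight xs v)).length := by
    rw [List.countP_eq_length]
    intro a ha
    obtain ⟨j, hj, rfl⟩ := List.mem_iff_getElem.mp ha
    rw [List.getElem_take]
    have hj' := hj; rw [List.length_take] at hj'
    simpa using h1 j (by omega) (by omega)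
  have hd : (xs.drop (PySem.List.bisectRight xs v)).countP (fun a => a ≤ v) = 0 := by
    rw [List.countP_eq_zero]
    intro a ha
    obtain ⟨j, hj, rfl⟩ := List.mem_iff_getElem.mp ha
    rw [List.getElem_drop]
    have hj' := hj; rw [List.length_drop] at hj'
    have := h2 (PySem.List.bisectRight xs v + j) (by omega) (by omega)
    simp only [decide_eq_true_eq]
    omega
  rw [ht, hd, List.length_take]
  omega

lemma bisectLeft_eq_countP (xs : List Int) (v : Int) (h : xs.Pairwise (· ≤ ·)) :
    PySem.List.bisectLeft xs v = xs.countP (fun a => a < v) := by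
  obtain ⟨hle, h1, h2⟩ := PySem.List.bisectLeft_spec xs v h
  conv_rhs => rw [← List.take_append_drop (PySem.List.bisectLeft xs v) xs]
  rw [List.countP_append]
  have ht : (xs.take (PySem.List.bisectLeft xs v)).countP (fun a => a < v)
      = (xs.take (PySem.List.bisectLeft xs v)).length := by
    rw [List.countP_eq_length]
    intro a ha
    obtain ⟨j, hj, rfl⟩ := List.mem_iff_getElem.mp ha
    rw [List.getElem_take]
    have hj' := hj; rw [List.length_take] at hj'
    simpa using h1 j (by omega) (by omega)
  have hd : (xs.drop (PySem.List.bisectLeft xs v)).countP (fun a => a < v) = 0 := by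
    rw [List.countP_eq_zero]
    intro a ha
    obtain ⟨j, hj, rfl⟩ := List.mem_iff_getElem.mp ha
    rw [List.getElem_drop]
    have hj' := hj; rw [List.length_drop] at hj'
    have := h2 (PySem.List.bisectLeft xs v + j) (by omega) (by omega)
    simp only [decide_eq_true_eq]
    omega
  rw [ht, hd, List.length_take]
  omega

-- (5) insort on a sorted list
lemma pyInsort_perm (xs : List Int) (v : Int) (h : xs.Pairwise (· ≤ ·)) :
    (pyInsort xs v).Perm (v :: xs) := by
  obtain ⟨hle, h1, h2⟩ := PySem.List.bisectRight_spec xs v h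
  rw [pyInsort, PySem.List.insert_natCast xs _ v hle]
  refine List.perm_middle.trans ?_
  rw [List.take_append_drop]

lemma pyInsort_sorted (xs : List Int) (v : Int) (h : xs.Pairwise (· ≤ ·)) :
    (pyInsort xs v).Pairwise (· ≤ ·) := by
  obtain ⟨hle, h1, h2⟩ := PySem.List.bisectRight_spec xs v h
  rw [pyInsort, PySem.List.insert_natCast xs _ v hle]
  have hub : ∀ a ∈ xs.take (PySem.List.bisectRight xs v), a ≤ v := by
    intro a ha
    obtain ⟨j, hj, rfl⟩ := List.mem_iff_getElem.mp ha
    rw [List.getElem_take]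
    have hj' := hj; rw [List.length_take] at hj'
    exact h1 j (by omega) (by omega)
  have hlb : ∀ b ∈ xs.drop (PySem.List.bisectRight xs v), v ≤ b := by
    intro b hb
    obtain ⟨j, hj, rfl⟩ := List.mem_iff_getElem.mp hb
    rw [List.getElem_drop]
    have hj' := hj; rw [List.length_drop] at hj'
    exact le_of_lt (h2 _ (by omega) (by omega))
  rw [List.pairwise_append]
  refine ⟨h.sublist (List.take_sublist _ _), ?_, ?_⟩
  · rw [List.pairwise_cons]
    exact ⟨hlb, h.sublist (List.drop_sublist _ _)⟩
  · intro a ha b hb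
    have hav := hub a ha
    rcases List.mem_cons.mp hb with rfl | hb'
    · exact hav
    · exact le_trans hav (hlb b hb')

-- (6) the two simulations, cut off after the first j inputs
def simA (l ex : List Int) (m : Int) (j : Nat) : List (Int × Int) × Int :=
  (PySem.List.enumerate (l.take j)).foldl (systemRunStep l ex m) ([], 0)

def simB (l ex : List Int) (m : Int) (j : Nat) : List (Int × Int) × List Int × Int :=
  (PySem.List.pyRange 0 (j : Int) 1).foldl (simStepB l ex m (preSums l)) ([], [], 0)

lemma simA_succ (l ex : List Int) (m : Int) (j : Nat) (hj : j < l.length) :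
    simA l ex m (j + 1) = systemRunStep l ex m (simA l ex m j) ((j : Int), l[j]) := by
  unfold simA
  rw [List.take_succ, List.getElem?_eq_getElem hj]
  rw [PySem.List.enumerate_append, List.foldl_append]
  simp [PySem.List.enumerate_cons, PySem.List.enumerate_nil, List.length_take,
    Nat.min_eq_left (le_of_lt hj)]

lemma simB_succ (l ex : List Int) (m : Int) (j : Nat) :
    simB l ex m (j + 1) = simStepB l ex m (preSums l) (simB l ex m j) (j : Int) := by
  unfold simB
  have hc : ((j + 1 : Nat) : Int) = (j : Int) + 1 := by push_cast; ring
  rw [hc, PySem.List.pyRange_one_succ_right (Int.natCast_nonneg j), List.foldl_append]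
  simp

def SimInv (l ex : List Int) (m : Int) (j : Nat) : Prop :=
  (simB l ex m j).1 = (simA l ex m j).1 ∧
  (simB l ex m j).2.1.Pairwise (· ≤ ·) ∧
  (simB l ex m j).2.1.Perm ((simA l ex m j).1.map Prod.fst) ∧
  (simA l ex m j).1.length ≤ j ∧
  (0 < j → (simA l ex m j).1 ≠ []) ∧
  ((simA l ex m j).1 ≠ [] →
    some (simB l ex m j).2.2 = ((simA l ex m j).1.getLast?).map Prod.snd)

lemma countP_add_countP_not (l : List Int) (p : Int → Bool) :
    l.countP p + l.countP (fun a => !p a) = l.length := by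
  induction l with
  | nil => simp
  | cons x t ih => by_cases h : p x <;> simp [h] <;> omega

lemma sim_inv (l ex : List Int) (m : Int) (j : Nat) (hj : j ≤ l.length) :
    SimInv l ex m j := by
  induction j with
  | zero =>
    unfold SimInv simA simB
    simp [PySem.List.enumerate_nil, PySem.List.pyRange_one_eq_nil]
  | succ j ihj =>
    have hjn : j < l.length := by omega
    obtain ⟨hres, hsort, hperm, hlen, hne, hlast⟩ := ihj (by omega)
    unfold SimInv
    rw [simA_succ l ex m j hjn, simB_succ l ex m j]
    by_cases hj0 : j = 0
    · subst hj0
      have ha0 : simA l ex m 0 = ([], 0) := by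
        simp [simA, PySem.List.enumerate_nil]
      have hb0 : simB l ex m 0 = ([], [], 0) := by
        simp [simB, PySem.List.pyRange_one_eq_nil]
      rw [ha0, hb0]
      simp only [systemRunStep, simStepB, Nat.cast_zero]
      have hfirst : (PySem.List.pyGet? l 0).getD 0 = l[0] := by
        rw [PySem.List.pyGet?_zero, List.getElem?_eq_getElem hjn]
        rfl
      have hins : pyInsort [] l[0] = [l[0]] := rfl
      simp [PySem.List.pyGetD, hfirst, hins]
    · -- j ≥ 1: the general step
      have hj0' : ((j : Nat) : Int) ≠ 0 := by exact_mod_cast hj0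
      have hRne : (simA l ex m j).1 ≠ [] := hne (Nat.pos_of_ne_zero hj0)
      obtain ⟨last, hlast?⟩ := Option.isSome_iff_exists.mp (List.getLast?_isSome.mpr hRne)
      have he : (simB l ex m j).2.2 = last.2 := by
        have h := hlast hRne
        rw [hlast?] at h
        simpa using h
      simp only [systemRunStep, simStepB, if_neg hj0']
      have harr : (PySem.List.slice l none (some ((j : Nat) : Int))).sum
          = PySem.List.pyGetD (preSums l) ((j : Nat) : Int) 0 := by
        rw [PySem.List.slice_to_natCast, preSums_pyGetD l j hjn]
      set at_ := PySem.List.pyGetD (preSums l) ((j : Nat) : Int) 0 with hat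
      simp only [harr]
      -- A's start = B's start
      have hstartA : find_exec_time at_ (simA l ex m j).1 = max at_ last.2 := by
        unfold find_exec_time
        rw [PySem.List.pyGet?_neg_one, hlast?]
        rfl
      have hstartB : (if at_ > (simB l ex m j).2.2 then at_ else (simB l ex m j).2.2)
          = max at_ last.2 := by
        rw [he, max_def]
        split_ifs <;> omega
      -- A's queued count is a countP
      have hq : (((simA l ex m j).1.map
            (fun stt => if stt.1 > at_ then (1 : Int) else 0)).sum)
          = ((simA l ex m j).1.countP (fun stt => decide (at_ < stt.1)) : Int) := by
        rw [← PySem.List.sum_map_ite_one_zero (fun stt : Int × Int => decide (at_ < stt.1))]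
        congr 1
        apply List.map_congr_left
        intro stt _
        by_cases h : at_ < stt.1 <;> simp [h, gt_iff_lt]
      -- B's acceptance test is the negation of A's skip test
      have hcount : PySem.List.bisectRight (simB l ex m j).2.1 at_
          = (simB l ex m j).2.1.countP (fun x => decide (x ≤ at_)) :=
        bisectRight_eq_countP _ _ hsort
      have hlen' : (simB l ex m j).2.1.length = (simA l ex m j).1.length := by
        rw [hperm.length_eq, List.length_map]
      have hnot : (simB l ex m j).2.1.countP (fun x => decide (x ≤ at_))
            + (simB l ex m j).2.1.countP (fun x => decide (at_ < x))
          = (simB l ex m j).2.1.length := by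
        have h := countP_add_countP_not (simB l ex m j).2.1 (fun x => decide (x ≤ at_))
        have h2 : (simB l ex m j).2.1.countP (fun a => !decide (a ≤ at_))
            = (simB l ex m j).2.1.countP (fun x => decide (at_ < x)) := by
          apply List.countP_congr
          intro x _
          simp [not_le]
        rw [h2] at h
        exact h
      have hgt : (simB l ex m j).2.1.countP (fun x => decide (at_ < x))
          = (simA l ex m j).1.countP (fun stt => decide (at_ < stt.1)) := by
        rw [List.Perm.countP_eq _ hperm, List.countP_map]
        rfl
      have hBcond : (((simB l ex m j).2.1.length : Int)
              - (PySem.List.bisectRight (simB l ex m j).2.1 at_ : Int) ≤ m)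
          ↔ ¬ (((simA l ex m j).1.countP (fun stt => decide (at_ < stt.1)) : Int) > m) := by
        rw [hcount]
        omega
      by_cases hskip : (((simA l ex m j).1.countP (fun stt => decide (at_ < stt.1)) : Int) > m)
      · -- A skips, B skips
        rw [hq, if_pos hskip, if_neg ((not_iff_not.mpr hBcond).mpr (not_not.mpr hskip))]
        exact ⟨hres, hsort, hperm, Nat.le_succ_of_le hlen, fun _ => hRne, hlast⟩
      · -- both accept
        rw [hq, if_neg hskip, if_pos (hBcond.mpr hskip)]
        have hexc : PySem.List.pyGetD ex ((j : Nat) : Int) 0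
            = (PySem.List.pyGet? ex ((j : Nat) : Int)).getD 0 := rfl
        refine ⟨?_, ?_, ?_, ?_, ?_, ?_⟩
        · simp only [hres, hstartA, hstartB, hexc]
        · exact pyInsort_sorted _ _ hsort
        · rw [hstartB]
          refine (pyInsort_perm _ _ hsort).trans ?_
          simp only [List.map_append, List.map_cons, List.map_nil, hstartA]
          exact (hperm.cons _).trans (List.perm_append_singleton _ _).symm
        · simp only [List.length_append, List.length_cons, List.length_nil]
          omega
        · intro _
          simp
        · intro _
          rw [List.getLast?_concat]
          simp [hstartA, hstartB, hexc]

-- (7) the yardstick value of y at index k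
def yval (l : List Int) (R : List (Int × Int)) (k : Nat) : Int :=
  if (PySem.List.pyGetD (preSums l) (k : Int) 0) < (PySem.List.pyGetD R (k : Int) (0, 0)).1
  then (((preSums l).drop k).countP
          (fun t => t < (PySem.List.pyGetD R (k : Int) (0, 0)).1) : Int)
  else 0

lemma plotA_eq (l : List Int) (R : List (Int × Int)) :
    (PySem.List.enumerate R).foldl (plotStepA (preSums l)) ([], [])
      = (R.map Prod.fst, (List.range R.length).map (yval l R)) := by
  have hstep : plotStepA (preSums l)
      = (fun (xy : List Int × List Int) (p : Int × (Int × Int)) =>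
          (xy.1 ++ [p.2.1],
           xy.2 ++ [if (PySem.List.pyGet? (preSums l) p.1).getD 0 < p.2.1
                    then (((PySem.List.slice (preSums l) (some p.1) none).filter
                            (fun arr_time => decide (arr_time < p.2.1))).length : Int)
                    else 0])) := by
    funext xy p
    simp only [plotStepA]
    split <;> rfl
  rw [hstep, PySem.List.foldl_prod_mk (fun (a : List Int) (p : Int × (Int × Int)) => a ++ [p.2.1])
      (fun (b : List Int) (p : Int × (Int × Int)) =>
        b ++ [if (PySem.List.pyGet? (preSums l) p.1).getD 0 < p.2.1
              then (((PySem.List.slice (preSums l) (some p.1) none).filter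
                      (fun arr_time => decide (arr_time < p.2.1))).length : Int)
              else 0]),
    PySem.List.foldl_append_singleton_eq_map, PySem.List.foldl_append_singleton_eq_map,
    Prod.mk.injEq]
  constructor
  · have : (fun p : Int × (Int × Int) => p.2.1) = Prod.fst ∘ (fun p : Int × (Int × Int) => p.2) := rfl
    rw [this, ← List.map_map, PySem.List.map_snd_enumerate]
    simp
  · rw [PySem.List.enumerate_eq_map_pyRange R (0, 0), List.map_map, PySem.List.pyRange_one,
      List.map_map]
    simp only [List.nil_append, PySem.List.len, Int.sub_zero, Int.toNat_natCast]
    apply List.map_congr_left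
    intro k hk
    rw [List.mem_range] at hk
    unfold yval
    simp only [Function.comp_apply, zero_add, PySem.List.pyGetD, PySem.List.slice_from_natCast,
      List.countP_eq_length_filter]
    rfl

-- (8) B's backward plot loop
def plotB (l : List Int) (R : List (Int × Int)) (i : Nat) : List Int × List Int :=
  (PySem.List.pyRange (i : Int) (l.length : Int) 1).foldr
    (fun idx st => plotStepB (preSums l) R R.length st idx) ([], [])

lemma plotB_eq_foldr (l : List Int) (R : List (Int × Int)) :
    (PySem.List.pyRange ((l.length : Int) - 1) (-1) (-1)).foldl
        (plotStepB (preSums l) R R.length) ([], [])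
      = plotB l R 0 := by
  have h0 : ((-1 : Int) + 1) = 0 := by ring
  rw [show ((l.length : Int) - 1) = ((l.length : Int) - 1) from rfl]
  rw [PySem.List.pyRange_neg_one_eq_reverse, List.foldl_reverse]
  unfold plotB
  rw [h0, show ((l.length : Int) - 1 + 1) = (l.length : Int) by ring]
  norm_num

lemma plotB_inv (l : List Int) (R : List (Int × Int)) (hK : R.length ≤ l.length)
    (t i : Nat) (hit : i + t = l.length) :
    (plotB l R i).1.Pairwise (· ≤ ·) ∧
    (plotB l R i).1.Perm ((preSums l).drop i) ∧
    (plotB l R i).2 = ((List.range R.length).drop i).map (yval l R) := by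
  induction t generalizing i with
  | zero =>
    have hi : i = l.length := by omega
    subst hi
    unfold plotB
    rw [PySem.List.pyRange_one_eq_nil le_rfl]
    refine ⟨List.Pairwise.nil, ?_, ?_⟩
    · rw [List.drop_eq_nil_of_le (by rw [length_preSums])]
      simp
    · rw [List.drop_eq_nil_of_le (by simpa using hK)]
      simp
  | succ t ih =>
    have hin : i < l.length := by omega
    have hrec : plotB l R i = plotStepB (preSums l) R R.length (plotB l R (i + 1)) (i : Int) := by
      unfold plotB
      rw [PySem.List.pyRange_one_cons (by exact_mod_cast hin), List.foldr_cons]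
      have hc : ((i : Int) + 1) = ((i + 1 : Nat) : Int) := by push_cast; ring
      rw [hc]
    obtain ⟨ihs, ihp, ihy⟩ := ih (i + 1) (by omega)
    have harr : PySem.List.pyGetD (preSums l) (i : Int) 0 = (l.take i).sum :=
      preSums_pyGetD l i hin
    have hdrop : (preSums l).drop i
        = PySem.List.pyGetD (preSums l) (i : Int) 0 :: (preSums l).drop (i + 1) := by
      rw [List.drop_eq_getElem_cons (by rw [length_preSums]; exact hin)]
      rw [preSums_getElem l i hin, harr]
    have hsorted' := pyInsort_sorted _ (PySem.List.pyGetD (preSums l) (i : Int) 0) ihs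
    have hperm' : (pyInsort (plotB l R (i + 1)).1
        (PySem.List.pyGetD (preSums l) (i : Int) 0)).Perm ((preSums l).drop i) := by
      refine (pyInsort_perm _ _ ihs).trans ?_
      rw [hdrop]
      exact ihp.cons _
    rw [hrec]
    simp only [plotStepB]
    by_cases hiK : i < R.length
    · rw [if_pos (by exact_mod_cast hiK)]
      refine ⟨hsorted', hperm', ?_⟩
      have hr : (List.range R.length).drop i = i :: (List.range R.length).drop (i + 1) := by
        refine (List.drop_eq_getElem_cons (by simpa using hiK)).trans ?_
        simp
      rw [hr, List.map_cons, ihy]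
      unfold yval
      rcases lt_or_ge (PySem.List.pyGetD (preSums l) (i : Int) 0)
          ((PySem.List.pyGetD R (i : Int) (0, 0)).1) with hlt | hge
      · rw [if_pos hlt, if_pos hlt]
        rw [bisectLeft_eq_countP _ _ hsorted']
        rw [hperm'.countP_eq]
      · rw [if_neg (not_lt.mpr hge), if_neg (not_lt.mpr hge)]
    · rw [if_neg (by exact_mod_cast hiK)]
      refine ⟨hsorted', hperm', ?_⟩
      rw [ihy]
      have h1 : (List.range R.length).drop i = [] :=
        List.drop_eq_nil_of_le (by simpa using le_of_not_gt hiK)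
      have h2 : (List.range R.length).drop (i + 1) = [] :=
        List.drop_eq_nil_of_le (by simp; omega)
      rw [h1, h2]

-- ===== VERDICT (by name: the statement is the Claim_ definition above) =====
theorem queue_plot_spec : Claim_equal_queue_plot := by
  unfold Claim_equal_queue_plot
  intro l ex m _ _
  simp only [Spec_queue_plot, queue_plot, queue_plot_alt]
  rw [arrivalsB_eq, arrivalsA_eq]
  have hA : system_run l ex m = (simA l ex m l.length).1 := by
    unfold system_run simA
    rw [List.take_length]
  have hB : (PySem.List.pyRange 0 ((l.length : Nat) : Int) 1).foldl
      (simStepB l ex m (preSums l)) ([], [], 0) = simB l ex m l.length := rfl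
  obtain ⟨hres, _, _, hlen, _, _⟩ := sim_inv l ex m l.length le_rfl
  rw [hA, hB, hres]
  obtain ⟨_, _, hy⟩ := plotB_inv l (simA l ex m l.length).1 hlen l.length 0 (by omega)
  rw [plotA_eq, plotB_eq_foldr, hy]
  simp
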